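-- pv_equiv track=rewrite | github.com/BillChan226/openenv-gen | demos/github-web/tasks/validators.py | record_exists
-- ===== SOURCE A (Python) =====
-- from typing import Any, Callable, Dict, List, Optional
--
-- def record_exists(
--     db_state: Dict[str, Any],
--     table: str,
--     conditions: Dict[str, Any],
-- ) -> bool:
--     """Check if a record matching conditions exists."""
--     records = db_state.get(table, [])
--     for record in records:
--         if all(record.get(k) == v for k, v in conditions.items()):
--             return True
--     return False
-- ===== SOURCE B (Python) =====
-- from typing import Any, Dict
--
-- def record_exists(
--     db_state: Dict[str, Any],
--     table: str,
--     conditions: Dict[str, Any],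
-- ) -> bool:
--     """Check if a record matching conditions exists (progressive column-wise filter)."""
--     candidates = list(db_state.get(table, []))
--     for k, v in conditions.items():
--         candidates = [r for r in candidates if r.get(k) == v]
--     return bool(candidates)
-- ===== Notes on version B (the rewrite author's own statement) =====
-- stated objective: alternative
-- what changed: Replaces the per-record scan with an inner all() over conditions by a progressive column-wise filter: the candidate list is narrowed once per condition and the result is whether any candidate survives.
import Mathlib
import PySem

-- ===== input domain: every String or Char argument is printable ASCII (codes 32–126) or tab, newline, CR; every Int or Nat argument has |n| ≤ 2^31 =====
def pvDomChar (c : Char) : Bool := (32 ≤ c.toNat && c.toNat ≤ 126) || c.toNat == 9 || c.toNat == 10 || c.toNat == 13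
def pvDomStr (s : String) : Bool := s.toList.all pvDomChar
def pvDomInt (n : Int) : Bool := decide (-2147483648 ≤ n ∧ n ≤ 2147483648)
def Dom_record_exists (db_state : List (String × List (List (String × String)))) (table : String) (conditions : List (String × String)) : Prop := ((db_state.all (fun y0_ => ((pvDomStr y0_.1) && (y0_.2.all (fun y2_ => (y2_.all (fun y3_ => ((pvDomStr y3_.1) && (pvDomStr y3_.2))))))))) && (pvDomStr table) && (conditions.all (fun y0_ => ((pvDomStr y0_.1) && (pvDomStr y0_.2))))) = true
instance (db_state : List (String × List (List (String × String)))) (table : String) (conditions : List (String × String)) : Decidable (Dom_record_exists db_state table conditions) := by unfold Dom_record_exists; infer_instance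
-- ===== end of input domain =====

-- B replaces A's per-record scan (inner all() over conditions) by a progressive column-wise filter that narrows a candidate list once per condition; objective: alternative decomposition, same cost.


-- ===== PORT A =====
-- first-match association lookup (Python dict .get with default)
def assocGet (d : List (String × String)) (k : String) : Option String :=
  match d with
  | [] => none
  | (k', v) :: rest => if k' == k then some v else assocGet rest k

def tableGet (db : List (String × List (List (String × String)))) (t : String) : List (List (String × String)) :=
  match db with
  | [] => []
  | (k, v) :: rest => if k == t then v else tableGet rest t

-- the for-loop over records with its early return
def loopA (records : List (List (String × String))) (conditions : List (String × String)) : Bool :=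
  match records with
  | [] => false
  | record :: rest =>
      if conditions.all (fun kv => assocGet record kv.1 == some kv.2) then true
      else loopA rest conditions

def record_exists (db_state : List (String × List (List (String × String)))) (table : String) (conditions : List (String × String)) : Bool :=
  loopA (tableGet db_state table) conditions

-- ===== PORT B =====
-- progressive column-wise filter: narrow the candidate list once per condition
def record_exists_alt (db_state : List (String × List (List (String × String)))) (table : String) (conditions : List (String × String)) : Bool :=
  let candidates := conditions.foldl
    (fun cs kv => cs.filter (fun r => assocGet r kv.1 == some kv.2))
    (tableGet db_state table)
  !candidates.isEmpty

-- ===== PRECONDITION & SPEC =====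
def Spec_record_exists (db_state : List (String × List (List (String × String)))) (table : String) (conditions : List (String × String)) (out : Bool) : Prop := out = record_exists_alt db_state table conditions
instance (db_state : List (String × List (List (String × String)))) (table : String) (conditions : List (String × String)) (out : Bool) : Decidable (Spec_record_exists db_state table conditions out) := by unfold Spec_record_exists; infer_instance

-- ===== CLAIM (what is proved, stated in full; the proofs are below) =====
def Claim_equal_record_exists : Prop := ∀ (db_state : List (String × List (List (String × String)))) (table : String) (conditions : List (String × String)), Dom_record_exists db_state table conditions → Spec_record_exists db_state table conditions (record_exists db_state table conditions)

-- ===== LEMMAS AND PROOFS =====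
theorem loopA_eq_any (records : List (List (String × String))) (conditions : List (String × String)) :
    loopA records conditions = records.any (fun r => conditions.all (fun kv => assocGet r kv.1 == some kv.2)) := by
  induction records with
  | nil => rfl
  | cons r rest ih => simp [loopA, ih]

theorem foldl_filter_eq (conditions : List (String × String)) (init : List (List (String × String))) :
    conditions.foldl (fun cs kv => cs.filter (fun r => assocGet r kv.1 == some kv.2)) init
      = init.filter (fun r => conditions.all (fun kv => assocGet r kv.1 == some kv.2)) := by
  induction conditions generalizing init with
  | nil => simp
  | cons c cs ih =>
      simp only [List.foldl_cons, ih, List.filter_filter]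
      apply List.filter_congr
      intro r _
      simp [List.all_cons, Bool.and_comm]

theorem any_eq_not_isEmpty_filter (l : List (List (String × String))) (p : List (String × String) → Bool) :
    l.any p = !(l.filter p).isEmpty := by
  induction l with
  | nil => rfl
  | cons r rest ih => by_cases h : p r <;> simp [h, ih]

-- ===== VERDICT (by name: the statement is the Claim_ definition above) =====
theorem record_exists_spec : Claim_equal_record_exists := by
  intro db table conds _
  unfold Spec_record_exists record_exists record_exists_alt
  rw [loopA_eq_any, foldl_filter_eq, any_eq_not_isEmpty_filter]
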